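-- pv_equiv track=rewrite | github.com/yukinoxita/decrypt_it | rot.py | rot5
-- ===== SOURCE A (Python) =====
-- def rot5(s):
--     ans = ''
--     for i in s:
--         if not i.isdigit():
--             ans += i
--             continue
--         check = ord(i)
--         check += 5
--         if check > ord('9'):
--             check -= 10
--         ans += chr(check)
--     return ans
-- ===== SOURCE B (Python) =====
-- def rot5(s):
--     table = str.maketrans('0123456789', '5678901234')
--     return s.translate(table)
-- ===== Notes on version B (the rewrite author's own statement) =====
-- stated objective: idiomatic
-- what changed: Replaces the explicit character loop with isdigit test and ord/chr arithmetic plus string concatenation by a precomputed ROT5 translation table applied with a single str.translate call.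
import Mathlib
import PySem

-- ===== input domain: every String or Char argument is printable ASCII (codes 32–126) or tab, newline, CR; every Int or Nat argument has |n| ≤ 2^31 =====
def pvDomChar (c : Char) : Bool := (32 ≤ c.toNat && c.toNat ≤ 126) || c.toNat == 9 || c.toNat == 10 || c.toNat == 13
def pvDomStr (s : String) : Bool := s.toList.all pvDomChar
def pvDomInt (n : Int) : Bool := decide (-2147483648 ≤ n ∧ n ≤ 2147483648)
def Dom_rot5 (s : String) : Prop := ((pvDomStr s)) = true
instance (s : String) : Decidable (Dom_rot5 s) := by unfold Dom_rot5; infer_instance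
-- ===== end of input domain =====

-- B replaces the explicit per-character arithmetic loop by a precomputed ROT5
-- translation table applied in one pass (idiomatic str.translate).

-- ===== PORT A =====
def rot5 (s : String) : String :=
  s.toList.foldl (fun ans i =>
    if ¬ (PySem.Chars.isdigit i) then ans ++ String.ofList [i]
    else
      let check := i.toNat
      let check := check + 5
      let check := if check > ('9').toNat then check - 10 else check
      ans ++ String.ofList [Char.ofNat check]) ""

-- ===== PORT B =====
-- str.maketrans('0123456789','5678901234') as an association list
def rot5Table : List (Char × Char) :=
  [('0','5'),('1','6'),('2','7'),('3','8'),('4','9'),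
   ('5','0'),('6','1'),('7','2'),('8','3'),('9','4')]

-- s.translate(table): map each char through the table, absent chars unchanged
def rot5_alt (s : String) : String :=
  String.ofList (s.toList.map (fun c => ((rot5Table.lookup c).getD c)))

-- ===== PRECONDITION & SPEC =====
def Spec_rot5 (s : String) (out : String) : Prop := out = rot5_alt s
instance (s : String) (out : String) : Decidable (Spec_rot5 s out) := by unfold Spec_rot5; infer_instance

-- ===== CLAIM (what is proved, stated in full; the proofs are below) =====
def Claim_equal_rot5 : Prop := ∀ (s : String), Dom_rot5 s → Spec_rot5 s (rot5 s)

-- ===== LEMMAS AND PROOFS =====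

-- On any domain character, A's loop body appends exactly B's table image of that character.
theorem rot5_char (c : Char) (h : pvDomChar c = true) :
    (if ¬ (PySem.Chars.isdigit c) then String.ofList [c]
     else String.ofList [Char.ofNat (if c.toNat + 5 > ('9').toNat then c.toNat + 5 - 10 else c.toNat + 5)])
    = String.ofList [(rot5Table.lookup c).getD c] := by
  have hc : Char.ofNat c.toNat = c := Char.ofNat_toNat c
  have hb : 32 ≤ c.toNat ∧ c.toNat ≤ 126 ∨ c.toNat = 9 ∨ c.toNat = 10 ∨ c.toNat = 13 := by
    simp [pvDomChar] at h; omega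
  rw [← hc]
  rcases hb with ⟨h1, h2⟩ | h1 | h1 | h1
  · interval_cases h3 : c.toNat <;> decide
  all_goals rw [h1]; decide

theorem rot5_loop (l : List Char) (ans : String) (h : l.all pvDomChar = true) :
    l.foldl (fun ans i =>
      if ¬ (PySem.Chars.isdigit i) then ans ++ String.ofList [i]
      else
        let check := i.toNat
        let check := check + 5
        let check := if check > ('9').toNat then check - 10 else check
        ans ++ String.ofList [Char.ofNat check]) ans
    = ans ++ String.ofList (l.map (fun c => ((rot5Table.lookup c).getD c))) := by
  induction l generalizing ans with
  | nil => simp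
  | cons c t ih =>
    simp only [List.all_cons, Bool.and_eq_true] at h
    have hstep := rot5_char c h.1
    simp only [List.foldl_cons, List.map_cons]
    rw [ih _ h.2]
    by_cases hd : PySem.Chars.isdigit c <;>
      simp [hd] at hstep ⊢ <;> rw [hstep] <;>
      simp [String.append_assoc, ← String.ofList_append]

-- ===== VERDICT (by name: the statement is the Claim_ definition above) =====
theorem rot5_spec : Claim_equal_rot5 := by
  intro s hdom
  unfold Spec_rot5 rot5 rot5_alt
  rw [rot5_loop _ _ hdom]
  simp
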